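-- pv_equiv track=rewrite | github.com/AslanAmantaev/TechOrda | python/легкие вопросы/perfectly-balanced.py | perfect
-- ===== SOURCE A (Python) =====
-- def perfect(array):
--     for i in range(1,len(array)-1):
--         left=0
--         right=0
--         for j in range(i):
--             left+=array[j]
--         for j in range(i+1,len(array)):
--             right+=array[j]
--         if left==right:
--             return True
--     return False
-- ===== SOURCE B (Python) =====
-- def perfect(array):
--     total = sum(array)
--     left = 0
--     for i in range(1, len(array) - 1):
--         left += array[i - 1]
--         if 2 * left + array[i] == total:
--             return True
--     return False
-- ===== Notes on version B (the rewrite author's own statement) =====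
-- stated objective: faster
-- what changed: Replace the per-pivot inner summation loops by a single pass that maintains a running left prefix sum and compares it against the precomputed total (left == total - left - array[i]).
import Mathlib
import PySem

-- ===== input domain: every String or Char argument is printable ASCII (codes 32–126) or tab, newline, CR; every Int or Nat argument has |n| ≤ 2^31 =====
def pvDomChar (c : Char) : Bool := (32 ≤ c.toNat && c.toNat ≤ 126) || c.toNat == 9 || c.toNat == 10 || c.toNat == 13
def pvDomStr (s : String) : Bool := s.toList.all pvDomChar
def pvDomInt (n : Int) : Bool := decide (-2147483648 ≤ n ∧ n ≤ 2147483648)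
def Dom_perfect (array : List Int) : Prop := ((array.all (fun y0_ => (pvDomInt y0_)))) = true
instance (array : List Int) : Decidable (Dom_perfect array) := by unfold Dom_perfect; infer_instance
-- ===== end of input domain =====

-- B replaces A's per-pivot inner summation loops by one pass keeping a running left
-- prefix sum compared against the precomputed total (objective: faster, O(n) vs O(n^2)).

-- ===== PORT A =====
-- the outer 'for i in range(1, len(array)-1)' with early 'return True'
def perfectGoA (array : List Int) : List Int → Bool
  | [] => false
  | i :: rest =>
    let left := (PySem.List.pyRange 0 i 1).foldl (fun acc j => acc + PySem.List.pyGetD array j 0) 0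
    let right := (PySem.List.pyRange (i + 1) (array.length : Int) 1).foldl
        (fun acc j => acc + PySem.List.pyGetD array j 0) 0
    if left = right then true else perfectGoA array rest

def perfect (array : List Int) : Bool :=
  perfectGoA array (PySem.List.pyRange 1 ((array.length : Int) - 1) 1)

-- ===== PORT B =====
-- the single 'for i in range(1, len(array)-1)' of Source B, carrying the running 'left'
def perfectGoB (array : List Int) (total : Int) : List Int → Int → Bool
  | [], _ => false
  | i :: rest, left =>
    let left := left + PySem.List.pyGetD array (i - 1) 0
    if 2 * left + PySem.List.pyGetD array i 0 = total then true
    else perfectGoB array total rest left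

def perfect_alt (array : List Int) : Bool :=
  perfectGoB array array.sum (PySem.List.pyRange 1 ((array.length : Int) - 1) 1) 0

-- ===== PRECONDITION & SPEC =====
def Spec_perfect (array : List Int) (out : Bool) : Prop := out = perfect_alt array
instance (array : List Int) (out : Bool) : Decidable (Spec_perfect array out) := by unfold Spec_perfect; infer_instance

-- ===== CLAIM (what is proved, stated in full; the proofs are below) =====
def Claim_equal_perfect : Prop := ∀ (array : List Int), Dom_perfect array → Spec_perfect array (perfect array)

-- ===== LEMMAS AND PROOFS =====

-- prefix of the array as a range-map
lemma map_getD_range_take (array : List Int) : ∀ (i : Nat), i ≤ array.length →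
    (List.range i).map (fun k => PySem.List.pyGetD array ((0 : Int) + (k : Nat)) 0)
      = array.take i := by
  intro i
  induction i with
  | zero => intro _; simp
  | succ n ih =>
    intro h
    have hlt : n < array.length := by omega
    rw [List.range_succ, List.map_append, ih (by omega), List.take_add_one]
    have hg : PySem.List.pyGetD array ((0 : Int) + (n : Nat)) 0 = array[n] := by
      rw [show ((0 : Int) + (n : Nat)) = ((n : Nat) : Int) by ring]
      rw [PySem.List.pyGetD_eq_getElem array 0 (by omega) (by exact_mod_cast hlt)]
      simp
    rw [List.map_singleton, hg, List.getElem?_eq_getElem hlt]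
    simp

lemma map_getD_range_prefix (array : List Int) (i : Nat) (h : i ≤ array.length) :
    (PySem.List.pyRange 0 (i : Int) 1).map (fun j => PySem.List.pyGetD array j 0)
      = array.take i := by
  rw [PySem.List.pyRange_one, List.map_map]
  have h0 : (((i : Int)) - 0).toNat = i := by omega
  rw [h0]
  exact map_getD_range_take array i h

lemma split_sum (xs : List Int) (i : Nat) (h : i < xs.length) :
    xs.sum = (xs.take i).sum + xs[i] + (xs.drop (i + 1)).sum := by
  conv_lhs => rw [← List.take_append_drop i xs]
  rw [List.sum_append, List.drop_eq_getElem_cons h, List.sum_cons]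
  ring

lemma go_eq (array : List Int) (n : Nat) :
    ∀ i : Int, 1 ≤ i → i = (array.length : Int) - 1 - n →
      perfectGoA array (PySem.List.pyRange i ((array.length : Int) - 1) 1)
        = perfectGoB array array.sum (PySem.List.pyRange i ((array.length : Int) - 1) 1)
            ((array.take (i - 1).toNat).sum) := by
  induction n with
  | zero =>
    intro i _ hi
    rw [PySem.List.pyRange_one_eq_nil (by omega)]
    rfl
  | succ n ih =>
    intro i h1 hi
    have hlt : i < (array.length : Int) - 1 := by omega
    rw [PySem.List.pyRange_one_cons hlt]
    set k := i.toNat with hk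
    have hik : i = (k : Int) := by omega
    have hk1 : 1 ≤ k := by omega
    have hklen : k + 1 < array.length := by omega
    -- A's left and right
    have hleft : (PySem.List.pyRange 0 i 1).foldl
        (fun acc j => acc + PySem.List.pyGetD array j 0) 0 = (array.take k).sum := by
      rw [PySem.List.foldl_add, hik, map_getD_range_prefix array k (by omega), zero_add]
    have hright : (PySem.List.pyRange (i + 1) (array.length : Int) 1).foldl
        (fun acc j => acc + PySem.List.pyGetD array j 0) 0 = (array.drop (k + 1)).sum := by
      rw [PySem.List.foldl_pyRange_pyGetD' array 0 (fun acc x => acc + x) 0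
        (by omega : (0 : Int) ≤ i + 1)]
      have h2 : (i + 1).toNat = k + 1 := by omega
      rw [h2, List.sum_eq_foldl]
    -- B's updated left
    have h1k : (i - 1).toNat = k - 1 := by omega
    have hgetprev : PySem.List.pyGetD array (i - 1) 0 = array[k - 1]'(by omega) := by
      rw [PySem.List.pyGetD_eq_getElem array 0 (by omega) (by omega)]
      simp only [h1k]
    have hbleft : (array.take (i - 1).toNat).sum + PySem.List.pyGetD array (i - 1) 0
        = (array.take k).sum := by
      rw [hgetprev, h1k]
      conv_rhs => rw [show k = (k - 1) + 1 by omega]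
      rw [List.take_add_one, List.getElem?_eq_getElem (by omega : k - 1 < array.length),
        List.sum_append]
      simp
    have hgeti : PySem.List.pyGetD array i 0 = array[k]'(by omega) := by
      rw [PySem.List.pyGetD_eq_getElem array 0 (by omega) (by omega)]
    -- the two tests agree
    have htot := split_sum array k (by omega)
    have hcond : ((array.take k).sum = (array.drop (k + 1)).sum)
        ↔ (2 * (array.take k).sum + array[k]'(by omega) = array.sum) := by
      constructor <;> intro hc <;> omega
    simp only [perfectGoA, perfectGoB, hleft, hright, hbleft, hgeti]
    by_cases hc : (array.take k).sum = (array.drop (k + 1)).sum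
    · rw [if_pos hc, if_pos (hcond.mp hc)]
    · rw [if_neg hc, if_neg (fun hx => hc (hcond.mpr hx))]
      have : i + 1 = (array.length : Int) - 1 - n := by omega
      have hrec := ih (i + 1) (by omega) this
      have : (i + 1 - 1).toNat = k := by omega
      rw [this] at hrec
      exact hrec

-- ===== VERDICT (by name: the statement is the Claim_ definition above) =====
theorem perfect_spec : Claim_equal_perfect := by
  intro array _
  unfold Spec_perfect perfect perfect_alt
  by_cases h : (2 : Int) ≤ (array.length : Int) - 1
  · have := go_eq array ((array.length : Int) - 2).toNat 1 (by omega) (by omega)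
    simpa using this
  · rw [PySem.List.pyRange_one_eq_nil (by omega)]
    rfl
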